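-- pv_equiv track=rewrite | github.com/Reidaa/robbot.py | robbot/utils.py | get_chapter_number
-- ===== SOURCE A (Python) =====
-- from typing import Optional
--
-- def get_chapter_number(chapter_title) -> Optional[int]:
--     digits = ""
--     for c in reversed(chapter_title.rstrip()):
--         if c.isdigit():
--             digits = c + digits
--         elif digits:
--             break
--     if digits:
--         return int(digits)
--     else:
--         return None
-- ===== SOURCE B (Python) =====
-- from typing import Optional
--
-- def get_chapter_number(chapter_title) -> Optional[int]:
--     # single forward pass: track the current digit run and the last completed one
--     cur = ""
--     last = None
--     for c in chapter_title.rstrip():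
--         if c.isdigit():
--             cur += c
--         else:
--             if cur:
--                 last = cur
--             cur = ""
--     if cur:
--         last = cur
--     return int(last) if last is not None else None
-- ===== Notes on version B (the rewrite author's own statement) =====
-- stated objective: idiomatic
-- what changed: Replaces A's reversed scan with an early break by a single forward pass that tracks the current digit run and the last completed one, returning the last run.
import Mathlib
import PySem

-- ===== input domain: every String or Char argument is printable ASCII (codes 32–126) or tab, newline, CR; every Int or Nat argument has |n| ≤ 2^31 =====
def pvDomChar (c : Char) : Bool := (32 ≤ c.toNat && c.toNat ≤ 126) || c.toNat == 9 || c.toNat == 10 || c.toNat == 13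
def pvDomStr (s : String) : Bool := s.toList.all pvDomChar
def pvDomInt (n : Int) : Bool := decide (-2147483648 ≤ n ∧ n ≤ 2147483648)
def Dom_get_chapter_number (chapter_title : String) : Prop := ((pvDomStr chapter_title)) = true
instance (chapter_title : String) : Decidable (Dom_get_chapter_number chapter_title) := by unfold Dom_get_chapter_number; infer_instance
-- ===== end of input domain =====

-- B replaces A's reversed scan-with-break by a single forward pass that tracks the
-- current digit run and the last completed one (objective: simpler/idiomatic; same cost).

-- ===== PORT A =====
-- A's loop over reversed(chapter_title.rstrip()): `digits` accumulates by prepending,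
-- `break` once digits is nonempty and a non-digit is met.
def goA : List Char → List Char → List Char
  | [], digits => digits
  | c :: rest, digits =>
    if PySem.Chars.isdigit c then goA rest (c :: digits)
    else if digits ≠ [] then digits
    else goA rest digits

def get_chapter_number (chapter_title : String) : Option Int :=
  let digits := goA (PySem.Chars.rstrip chapter_title.toList).reverse []
  if digits ≠ [] then PySem.Int.ofChars? digits else none

-- ===== PORT B =====
-- forward fold state: (current digit run, last completed digit run)
def stepB (st : List Char × Option (List Char)) (c : Char) : List Char × Option (List Char) :=
  if PySem.Chars.isdigit c then (st.1 ++ [c], st.2)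
  else if st.1 ≠ [] then ([], some st.1) else ([], st.2)

def get_chapter_number_alt (chapter_title : String) : Option Int :=
  let st := (PySem.Chars.rstrip chapter_title.toList).foldl stepB ([], none)
  let last := if st.1 ≠ [] then some st.1 else st.2
  match last with
  | some d => PySem.Int.ofChars? d
  | none => none

-- ===== PRECONDITION & SPEC =====
def Spec_get_chapter_number (chapter_title : String) (out : Option Int) : Prop := out = get_chapter_number_alt chapter_title
instance (chapter_title : String) (out : Option Int) : Decidable (Spec_get_chapter_number chapter_title out) := by unfold Spec_get_chapter_number; infer_instance

-- ===== CLAIM (what is proved, stated in full; the proofs are below) =====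
def Claim_equal_get_chapter_number : Prop := ∀ (chapter_title : String), Dom_get_chapter_number chapter_title → Spec_get_chapter_number chapter_title (get_chapter_number chapter_title)

-- ===== LEMMAS AND PROOFS =====

-- once digits is nonempty, A collects the leading digit run of the rest and stops
theorem goA_of_ne (r : List Char) : ∀ acc : List Char, acc ≠ [] →
    goA r acc = (r.takeWhile PySem.Chars.isdigit).reverse ++ acc := by
  induction r with
  | nil => intro acc _; simp [goA]
  | cons c rest ih =>
    intro acc hacc
    by_cases hc : PySem.Chars.isdigit c
    · simp [goA, hc, List.takeWhile, ih (c :: acc) (by simp)]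
    · simp [goA, hc, hacc, List.takeWhile]

-- main invariant linking A's reversed scan on r to B's forward fold on r.reverse
theorem invAB (r : List Char) :
    ((r.reverse.foldl stepB ([], none)).1 = (r.takeWhile PySem.Chars.isdigit).reverse)
    ∧ (goA r [] = (if (r.reverse.foldl stepB ([], none)).1 ≠ [] then (r.reverse.foldl stepB ([], none)).1
        else ((r.reverse.foldl stepB ([], none)).2.getD [])))
    ∧ (∀ x, (r.reverse.foldl stepB ([], none)).2 = some x → x ≠ []) := by
  induction r with
  | nil => simp [goA]
  | cons c rest ih =>
    obtain ⟨ih1, ih2, ih3⟩ := ih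
    rw [show (c :: rest).reverse = rest.reverse ++ [c] by simp] at *
    rw [List.foldl_append]
    generalize hst : rest.reverse.foldl stepB (([], none) : List Char × Option (List Char)) = st at ih1 ih2 ih3 ⊢
    obtain ⟨cur, last⟩ := st
    simp only [List.foldl_cons, List.foldl_nil]
    by_cases hc : PySem.Chars.isdigit c
    · refine ⟨?_, ?_, ?_⟩
      · simp at ih1
        simp [stepB, hc, List.takeWhile, ih1]
      · have := goA_of_ne rest [c] (by simp)
        simp at ih1
        simp [goA, hc, stepB, this, ih1]
      · intro x hx
        simp [stepB, hc] at hx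
        exact ih3 x hx
    · by_cases h1 : cur = []
      · refine ⟨?_, ?_, ?_⟩
        · simp [stepB, hc, h1, List.takeWhile]
        · simp at ih2
          simp [goA, hc, stepB, h1, ih2]
        · intro x hx
          simp [stepB, hc, h1] at hx
          exact ih3 x hx
      · refine ⟨?_, ?_, ?_⟩
        · simp [stepB, hc, h1, List.takeWhile]
        · simp at ih2
          simp [goA, hc, stepB, h1, ih2]
        · intro x hx
          simp [stepB, hc, h1] at hx
          rw [← hx]; exact h1

-- ===== VERDICT (by name: the statement is the Claim_ definition above) =====
theorem get_chapter_number_spec : Claim_equal_get_chapter_number := by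
  intro s _
  unfold Spec_get_chapter_number get_chapter_number get_chapter_number_alt
  set l := PySem.Chars.rstrip s.toList with hl
  have h := invAB l.reverse
  rw [List.reverse_reverse] at h
  obtain ⟨_, h2, h3⟩ := h
  rw [h2]
  rcases hst2 : (l.foldl stepB (([], none) : List Char × Option (List Char))).2 with _ | x
  · by_cases h1 : (l.foldl stepB (([], none) : List Char × Option (List Char))).1 = []
    · simp [h1, hst2]
    · simp [h1]
  · by_cases h1 : (l.foldl stepB (([], none) : List Char × Option (List Char))).1 = []
    · simp [h1, hst2, h3 x hst2]
    · simp [h1]
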